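-- pv_equiv track=rewrite | github.com/Gaggu097/Advent_of_Code21 | day8/main.py | count_unique_digits
-- ===== SOURCE A (Python) =====
-- def count_unique_digits(lst):
--     digit_count = [0, 0, 0, 0]
--     for i in range(0, len(lst)):
--         for j in range(0, len(lst[i])):
--             length = len(lst[i][j])
--             if length == 2:
--                 digit_count[0] += 1
--             if length == 4:
--                 digit_count[1] += 1
--             if length == 3:
--                 digit_count[2] += 1
--             if length == 7:
--                 digit_count[3] += 1
--     one = digit_count[0]
--     four = digit_count[1]
--     seven = digit_count[2]
--     eight = digit_count[3]
--
--     return one + four + seven + eight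
-- ===== SOURCE B (Python) =====
-- def _bisect_left(a, x):
--     lo, hi = 0, len(a)
--     while lo < hi:
--         mid = (lo + hi) // 2
--         if a[mid] < x:
--             lo = mid + 1
--         else:
--             hi = mid
--     return lo
--
--
-- def _bisect_right(a, x):
--     lo, hi = 0, len(a)
--     while lo < hi:
--         mid = (lo + hi) // 2
--         if x < a[mid]:
--             hi = mid
--         else:
--             lo = mid + 1
--     return lo
--
--
-- def count_unique_digits(lst):
--     lengths = sorted(len(s) for row in lst for s in row)
--     return sum(_bisect_right(lengths, k) - _bisect_left(lengths, k)
--                for k in (2, 3, 4, 7))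
-- ===== Notes on version B (the rewrite author's own statement) =====
-- stated objective: alternative
-- what changed: Instead of a single tally pass with four branch counters, B sorts the flattened list of string lengths once and then counts each target length 2/3/4/7 by binary search (bisect_right minus bisect_left) on the sorted list.
import Mathlib
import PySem

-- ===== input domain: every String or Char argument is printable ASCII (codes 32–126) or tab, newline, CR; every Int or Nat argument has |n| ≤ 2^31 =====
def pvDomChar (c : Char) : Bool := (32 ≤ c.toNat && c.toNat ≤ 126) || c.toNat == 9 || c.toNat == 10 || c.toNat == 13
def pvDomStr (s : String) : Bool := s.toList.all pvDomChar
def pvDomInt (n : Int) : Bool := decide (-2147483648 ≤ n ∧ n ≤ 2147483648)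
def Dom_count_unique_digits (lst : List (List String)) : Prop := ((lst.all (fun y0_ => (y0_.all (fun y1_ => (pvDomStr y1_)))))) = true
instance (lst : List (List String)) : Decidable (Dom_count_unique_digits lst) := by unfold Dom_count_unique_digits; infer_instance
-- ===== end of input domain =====

-- B replaces A's single tally pass with four branch counters by a different algorithm:
-- sort the flattened list of string lengths once, then count each target length 2/3/4/7
-- by binary search (bisect_right - bisect_left) on the sorted list (objective: alternative).

-- ===== PORT A =====
-- state = digit_count = (count2, count4, count3, count7)
def pvAStep (st : Int × Int × Int × Int) (s : String) : Int × Int × Int × Int :=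
  let length := PySem.Str.len s
  let st := if length = 2 then (st.1 + 1, st.2.1, st.2.2.1, st.2.2.2) else st
  let st := if length = 4 then (st.1, st.2.1 + 1, st.2.2.1, st.2.2.2) else st
  let st := if length = 3 then (st.1, st.2.1, st.2.2.1 + 1, st.2.2.2) else st
  let st := if length = 7 then (st.1, st.2.1, st.2.2.1, st.2.2.2 + 1) else st
  st

def count_unique_digits (lst : List (List String)) : Int :=
  let dc := lst.foldl (fun st row => row.foldl pvAStep st) (0, 0, 0, 0)
  let one := dc.1
  let four := dc.2.1
  let seven := dc.2.2.1
  let eight := dc.2.2.2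
  one + four + seven + eight

-- ===== PORT B =====
-- Source B's hand-written _bisect_left/_bisect_right are exactly the standard bisect loops,
-- which PySem.List.bisectLeft / bisectRight implement step for step (same lo/hi/mid loop).
def count_unique_digits_alt (lst : List (List String)) : Int :=
  let lengths := PySem.List.sorted (lst.flatMap (fun row => row.map PySem.Str.len)) (fun x => x) false
  ((([2, 3, 4, 7] : List Int).map
      (fun k => (PySem.List.bisectRight lengths k : Int) - (PySem.List.bisectLeft lengths k : Int)))).sum

-- ===== PRECONDITION & SPEC =====
def Spec_count_unique_digits (lst : List (List String)) (out : Int) : Prop := out = count_unique_digits_alt lst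
instance (lst : List (List String)) (out : Int) : Decidable (Spec_count_unique_digits lst out) := by unfold Spec_count_unique_digits; infer_instance

-- ===== CLAIM (what is proved, stated in full; the proofs are below) =====
def Claim_equal_count_unique_digits : Prop := ∀ (lst : List (List String)), Dom_count_unique_digits lst → Spec_count_unique_digits lst (count_unique_digits lst)

-- ===== LEMMAS AND PROOFS =====

-- number of strings of Python-length k in a row
def pvN (k : Int) (row : List String) : Int := (row.map PySem.Str.len).count k

theorem pvN_nil (k : Int) : pvN k [] = 0 := rfl

theorem pvN_cons (k : Int) (s : String) (row : List String) :
    pvN k (s :: row) = (if PySem.Str.len s = k then 1 else 0) + pvN k row := by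
  simp only [pvN, List.map_cons, List.count_cons, beq_iff_eq]
  split_ifs <;> omega

-- A's inner fold adds the per-length counts of the row to the running state
theorem pvA_row (row : List String) (st : Int × Int × Int × Int) :
    row.foldl pvAStep st =
      (st.1 + pvN 2 row, st.2.1 + pvN 4 row, st.2.2.1 + pvN 3 row, st.2.2.2 + pvN 7 row) := by
  induction row generalizing st with
  | nil => simp [pvN_nil]
  | cons s t ih =>
    obtain ⟨a, b, c, d⟩ := st
    simp only [List.foldl_cons, ih, pvAStep, pvN_cons]
    split_ifs <;> simp_all <;> omega

-- A's outer fold, in closed form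
theorem pvA_outer (lst : List (List String)) (st : Int × Int × Int × Int) :
    lst.foldl (fun st row => row.foldl pvAStep st) st =
      (st.1 + pvN 2 lst.flatten, st.2.1 + pvN 4 lst.flatten,
       st.2.2.1 + pvN 3 lst.flatten, st.2.2.2 + pvN 7 lst.flatten) := by
  induction lst generalizing st with
  | nil => simp [pvN_nil]
  | cons row t ih =>
    rw [List.foldl_cons, pvA_row, ih, List.flatten_cons]
    have hN : ∀ k, pvN k (row ++ t.flatten) = pvN k row + pvN k t.flatten := by
      intro k; simp [pvN, List.count_append]
    simp only [hN]
    simp [add_assoc]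

-- bisectLeft ≤ bisectRight on a sorted list
theorem pv_bl_le_br (xs : List Int) (k : Int) (h : xs.Pairwise (· ≤ ·)) :
    PySem.List.bisectLeft xs k ≤ PySem.List.bisectRight xs k := by
  obtain ⟨hL1, hL2, hL3⟩ := PySem.List.bisectLeft_spec xs k h
  obtain ⟨hR1, hR2, hR3⟩ := PySem.List.bisectRight_spec xs k h
  by_contra hc
  push Not at hc
  have hlt : PySem.List.bisectRight xs k < xs.length := lt_of_lt_of_le hc hL1
  have h1 := hL2 _ hlt hc
  have h2 := hR3 _ hlt (le_refl _)
  omega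

-- the core fact: on a sorted list, count k = bisectRight - bisectLeft
theorem pv_count_eq_bisect (xs : List Int) (k : Int) (h : xs.Pairwise (· ≤ ·)) :
    (xs.count k : Int) =
      (PySem.List.bisectRight xs k : Int) - (PySem.List.bisectLeft xs k : Int) := by
  obtain ⟨hL1, hL2, hL3⟩ := PySem.List.bisectLeft_spec xs k h
  obtain ⟨hR1, hR2, hR3⟩ := PySem.List.bisectRight_spec xs k h
  set L := PySem.List.bisectLeft xs k with hLdef
  set R := PySem.List.bisectRight xs k with hRdef
  have hLR : L ≤ R := pv_bl_le_br xs k h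
  -- xs = take L ++ (middle) ++ drop R, middle all = k, sides avoid k
  have hsplit : xs = xs.take L ++ ((xs.drop L).take (R - L) ++ xs.drop R) := by
    have h1 : (xs.drop L).take (R - L) = (xs.drop L).take (R - L) := rfl
    have : (xs.drop L).take (R - L) ++ xs.drop R = xs.drop L := by
      have : xs.drop R = (xs.drop L).drop (R - L) := by
        rw [List.drop_drop]; congr 1; omega
      rw [this, List.take_append_drop]
    rw [this, List.take_append_drop]
  have ctake : (xs.take L).count k = 0 := by
    rw [List.count_eq_zero]
    intro hk
    obtain ⟨j, hj, hget⟩ := List.mem_iff_getElem.mp hk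
    have hjL : j < L := lt_of_lt_of_le hj (by simp [List.length_take])
    have hjlen : j < xs.length := by
      simp [List.length_take] at hj; omega
    have := hL2 j hjlen hjL
    rw [List.getElem_take] at hget
    omega
  have cdrop : (xs.drop R).count k = 0 := by
    rw [List.count_eq_zero]
    intro hk
    obtain ⟨j, hj, hget⟩ := List.mem_iff_getElem.mp hk
    rw [List.length_drop] at hj
    have hjlen : R + j < xs.length := by omega
    have := hR3 (R + j) hjlen (by omega)
    rw [List.getElem_drop] at hget
    omega
  have cmid : ((xs.drop L).take (R - L)).count k = R - L := by
    have hlenm : ((xs.drop L).take (R - L)).length = R - L := by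
      simp [List.length_take, List.length_drop]; omega
    have hall : ∀ b ∈ (xs.drop L).take (R - L), k = b := by
      intro b hb
      obtain ⟨j, hj, hget⟩ := List.mem_iff_getElem.mp hb
      rw [hlenm] at hj
      rw [List.getElem_take, List.getElem_drop] at hget
      have hjlen : L + j < xs.length := by omega
      have h1 := hL3 (L + j) hjlen (by omega)
      have h2 := hR2 (L + j) hjlen (by omega)
      omega
    rw [List.count_eq_length.mpr hall, hlenm]
  calc (xs.count k : Int)
      = ((xs.take L ++ ((xs.drop L).take (R - L) ++ xs.drop R)).count k : Int) := by
        rw [← hsplit]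
    _ = (R : Int) - (L : Int) := by
        simp [List.count_append, ctake, cdrop, cmid]
        omega

theorem pv_flat (lst : List (List String)) :
    lst.flatMap (fun row => row.map PySem.Str.len) = lst.flatten.map PySem.Str.len := by
  induction lst with
  | nil => rfl
  | cons r t ih => simp [List.flatMap_cons, List.flatten_cons, ih]

-- ===== VERDICT (by name: the statement is the Claim_ definition above) =====
theorem count_unique_digits_spec : Claim_equal_count_unique_digits := by
  intro lst _
  unfold Spec_count_unique_digits count_unique_digits count_unique_digits_alt
  simp only [pvA_outer]
  set raw := lst.flatMap (fun row => row.map PySem.Str.len) with hraw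
  set xs := PySem.List.sorted raw (fun x => x) false with hxs
  have hsorted : xs.Pairwise (· ≤ ·) := by
    have := PySem.List.sorted_pairwise raw (fun x => x)
    simpa using this
  have hperm : xs.Perm raw := PySem.List.sorted_perm raw (fun x => x) false
  have hcount : ∀ k : Int, xs.count k = raw.count k := fun k => hperm.count_eq k
  have hrawflat : raw = (lst.flatten.map PySem.Str.len) := by
    rw [hraw, pv_flat]
  have hN : ∀ k : Int, pvN k lst.flatten = (xs.count k : Int) := by
    intro k
    rw [hcount k, hrawflat, pvN]
  simp only [List.map_cons, List.map_nil, List.sum_cons, List.sum_nil]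
  rw [← pv_count_eq_bisect xs 2 hsorted, ← pv_count_eq_bisect xs 3 hsorted,
      ← pv_count_eq_bisect xs 4 hsorted, ← pv_count_eq_bisect xs 7 hsorted,
      ← hN 2, ← hN 3, ← hN 4, ← hN 7]
  ring
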